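-- pv_equiv track=rewrite | github.com/girishg-dh/algo_and_ds_in_python | random/kaitenzushi.py | getMaximumEatenDishCount
-- ===== SOURCE A (Python) =====
-- from collections import deque
--
-- def getMaximumEatenDishCount(N, D, K):
--     eaten_dishes = set()  # To track the last K eaten dishes
--     last_k_dishes = deque()  # To keep the order of the last K eaten dishes
--     eaten_count = 0  # To count how many dishes you've eaten
--
--     for dish in D:
--         if dish not in eaten_dishes:
--             # Eat the dish
--             eaten_count += 1
--             eaten_dishes.add(dish)
--             last_k_dishes.append(dish)
--
--             # If we've eaten more than K dishes, remove the oldest one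
--             if len(last_k_dishes) > K:
--                 oldest_dish = last_k_dishes.popleft()
--                 eaten_dishes.remove(oldest_dish)
--
--     return eaten_count
-- ===== SOURCE B (Python) =====
-- def getMaximumEatenDishCount(N, D, K):
--     last_eaten = {}  # dish -> eaten-count index at which it was last eaten
--     count = 0
--     for dish in D:
--         pos = last_eaten.get(dish)
--         if pos is None or pos <= count - K:
--             count += 1
--             last_eaten[dish] = count
--     return count
-- ===== Notes on version B (the rewrite author's own statement) =====
-- stated objective: simpler
-- what changed: Replaces the deque+set sliding-window eviction machinery with a single dict mapping each dish to the eaten-count index at which it was last eaten, deciding eligibility by position arithmetic (pos <= count - K) instead of maintaining and trimming the window.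
import Mathlib
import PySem

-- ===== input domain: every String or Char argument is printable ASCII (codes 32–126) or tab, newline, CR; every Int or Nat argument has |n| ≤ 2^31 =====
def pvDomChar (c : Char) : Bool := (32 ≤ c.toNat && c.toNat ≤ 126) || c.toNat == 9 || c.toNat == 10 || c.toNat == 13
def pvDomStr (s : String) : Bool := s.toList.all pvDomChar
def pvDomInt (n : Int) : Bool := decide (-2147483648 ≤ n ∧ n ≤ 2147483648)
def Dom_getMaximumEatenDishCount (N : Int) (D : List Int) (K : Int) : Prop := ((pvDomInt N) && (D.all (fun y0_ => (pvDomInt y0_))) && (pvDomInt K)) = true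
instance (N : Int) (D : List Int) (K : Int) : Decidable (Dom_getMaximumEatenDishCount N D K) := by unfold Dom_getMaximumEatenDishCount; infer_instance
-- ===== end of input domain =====

-- B replaces A's deque+set sliding-window eviction with one dict of last-eaten positions and a
-- `pos <= count - K` test (objective: simpler; same return value on every input).

-- ===== PORT A =====
-- one loop iteration of A: state = (eaten_dishes, last_k_dishes, eaten_count)
def pvStepA (K : Int) (st : PySem.Set Int × List Int × Int) (dish : Int) : PySem.Set Int × List Int × Int :=
  if PySem.Set.contains st.1 dish then st
  else if ((st.2.1 ++ [dish]).length : Int) > K then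
    match st.2.1 ++ [dish] with
    | [] => (PySem.Set.add st.1 dish, [], st.2.2 + 1)  -- unreachable: the deque just got an element appended
    | oldest :: rest =>
        -- eaten_dishes.remove(oldest): never raises here (oldest was just in the deque, hence in the set)
        ((PySem.Set.remove? (PySem.Set.add st.1 dish) oldest).getD (PySem.Set.add st.1 dish), rest, st.2.2 + 1)
  else (PySem.Set.add st.1 dish, st.2.1 ++ [dish], st.2.2 + 1)

def getMaximumEatenDishCount (N : Int) (D : List Int) (K : Int) : Int :=
  (D.foldl (pvStepA K) (PySem.Set.empty, ([] : List Int), (0 : Int))).2.2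

-- ===== PORT B =====
-- one loop iteration of B: state = (last_eaten, count)
def pvStepB (K : Int) (st : PySem.Dict Int Int × Int) (dish : Int) : PySem.Dict Int Int × Int :=
  match PySem.Dict.get? st.1 dish with
  | none => (PySem.Dict.insert st.1 dish (st.2 + 1), st.2 + 1)
  | some pos =>
      if pos ≤ st.2 - K then (PySem.Dict.insert st.1 dish (st.2 + 1), st.2 + 1) else st

def getMaximumEatenDishCount_alt (N : Int) (D : List Int) (K : Int) : Int :=
  (D.foldl (pvStepB K) (PySem.Dict.empty, (0 : Int))).2

-- ===== PRECONDITION & SPEC =====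
def Spec_getMaximumEatenDishCount (N : Int) (D : List Int) (K : Int) (out : Int) : Prop := out = getMaximumEatenDishCount_alt N D K
instance (N : Int) (D : List Int) (K : Int) (out : Int) : Decidable (Spec_getMaximumEatenDishCount N D K out) := by unfold Spec_getMaximumEatenDishCount; infer_instance

-- ===== CLAIM (what is proved, stated in full; the proofs are below) =====
def Claim_equal_getMaximumEatenDishCount : Prop := ∀ (N : Int) (D : List Int) (K : Int), Dom_getMaximumEatenDishCount N D K → Spec_getMaximumEatenDishCount N D K (getMaximumEatenDishCount N D K)

-- ===== LEMMAS AND PROOFS =====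

-- Coupling invariant between A's state (S, Q, c) and B's dict M (B's count equals c):
-- Q holds the last |Q| eaten dishes, whose recorded positions in M are c-|Q|+1, …, c.
def pvInv (K : Int) (S : PySem.Set Int) (Q : List Int) (c : Int) (M : PySem.Dict Int Int) : Prop :=
  0 ≤ c ∧
  (Q.length : Int) = min c (max K 0) ∧
  Q.Nodup ∧
  (∀ x : Int, x ∈ S ↔ x ∈ Q) ∧
  (∀ (j : Nat), (hj : j < Q.length) → PySem.Dict.get? M Q[j] = some (c - Q.length + 1 + j)) ∧
  (∀ d i, PySem.Dict.get? M d = some i → 1 ≤ i ∧ i ≤ c ∧ (d ∈ Q ↔ c - (Q.length : Int) < i))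

lemma pvStep_inv (K dish : Int) (S : PySem.Set Int) (Q : List Int) (c : Int)
    (M : PySem.Dict Int Int) (h : pvInv K S Q c M) :
    (pvStepB K (M, c) dish).2 = (pvStepA K (S, Q, c) dish).2.2 ∧
    pvInv K (pvStepA K (S, Q, c) dish).1 (pvStepA K (S, Q, c) dish).2.1
      (pvStepA K (S, Q, c) dish).2.2 (pvStepB K (M, c) dish).1 := by
  obtain ⟨hc, hlen, hnd, hSQ, hidx, hval⟩ := h
  by_cases hd : dish ∈ Q
  · -- A skips; B also skips because dish's position is still inside the window
    have hdS : dish ∈ S := (hSQ dish).mpr hd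
    obtain ⟨j, hj, hje⟩ := List.getElem_of_mem hd
    have hM : PySem.Dict.get? M dish = some (c - Q.length + 1 + j) := hje ▸ hidx j hj
    have hjQ : (j : Int) < Q.length := by exact_mod_cast hj
    have hA : pvStepA K (S, Q, c) dish = (S, Q, c) := by simp [pvStepA, hdS]
    have hB : pvStepB K (M, c) dish = (M, c) := by
      simp only [pvStepB, hM]
      rw [if_neg (by omega)]
    rw [hA, hB]
    exact ⟨rfl, hc, hlen, hnd, hSQ, hidx, hval⟩
  · -- A eats; B also eats (dish is absent from M, or its position fell out of the window)
    have hcontf : ¬(PySem.Set.contains S dish = true) := by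
      simp only [PySem.Set.contains_eq_listContains, List.contains_iff_mem]
      exact fun hx => hd ((hSQ dish).mp hx)
    have hB : pvStepB K (M, c) dish = (PySem.Dict.insert M dish (c + 1), c + 1) := by
      cases hM : PySem.Dict.get? M dish with
      | none => simp [pvStepB, hM]
      | some pos =>
          obtain ⟨h1, h2, h3⟩ := hval dish pos hM
          have hnlt : ¬(c - (Q.length : Int) < pos) := fun hx => hd (h3.mpr hx)
          simp only [pvStepB, hM]
          rw [if_pos (by omega)]
    rw [hB]
    simp only [pvStepA]
    rw [if_neg hcontf]
    by_cases hpop : (((Q ++ [dish]).length : Int) > K)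
    · rw [if_pos hpop]
      simp only [List.length_append, List.length_cons, List.length_nil] at hpop
      push_cast at hpop
      cases Q with
      | nil =>
          -- K ≤ 0: the just-eaten dish is evicted immediately; both windows stay empty
          simp only [List.length_nil, Nat.cast_zero] at hpop hlen
          have hK0 : K ≤ 0 := by omega
          have hrm : PySem.Set.remove? (PySem.Set.add S dish) dish
              = some ((PySem.Set.add S dish).discard dish) :=
            PySem.Set.remove?_of_mem ((PySem.Set.mem_add S dish dish).mpr (Or.inr rfl))
          simp only [List.nil_append]
          refine ⟨by trivial, by omega, by simp; omega, List.nodup_nil, ?_,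
            by intro j hj; simp at hj, ?_⟩
          · intro x
            rw [hrm]
            simp only [Option.getD_some, PySem.Set.mem_discard, PySem.Set.mem_add,
              List.not_mem_nil, iff_false]
            rintro ⟨hx1 | hx2, hx3⟩
            · simpa using (hSQ x).mp hx1
            · exact hx3 hx2
          · intro d i hMi
            rw [PySem.Dict.get?_insert] at hMi
            split_ifs at hMi with hdd
            · obtain rfl : i = c + 1 := (Option.some.inj hMi).symm
              refine ⟨by omega, by omega, ?_⟩
              simp only [List.not_mem_nil, false_iff, List.length_nil, Nat.cast_zero]
              omega
            · obtain ⟨h1, h2, h3⟩ := hval d i hMi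
              simp only [List.not_mem_nil, false_iff, List.length_nil, Nat.cast_zero] at h3 ⊢
              omega
      | cons q0 qt =>
          -- K ≥ 1 and the window was full: the oldest dish q0 falls out
          simp only [List.length_cons] at hlen hpop
          push_cast at hlen hpop
          have hq0 : q0 ∉ qt := (List.nodup_cons.mp hnd).1
          have hndt : qt.Nodup := (List.nodup_cons.mp hnd).2
          have hdq0 : dish ≠ q0 := fun he => hd (he ▸ List.mem_cons_self)
          have hdqt : dish ∉ qt := fun he => hd (List.mem_cons_of_mem _ he)
          have hrm : PySem.Set.remove? (PySem.Set.add S dish) q0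
              = some ((PySem.Set.add S dish).discard q0) :=
            PySem.Set.remove?_of_mem
              ((PySem.Set.mem_add S dish q0).mpr (Or.inl ((hSQ q0).mpr List.mem_cons_self)))
          simp only [List.cons_append]
          refine ⟨by trivial, by omega, ?_, ?_, ?_, ?_, ?_⟩
          · -- length
            simp only [List.length_append, List.length_cons, List.length_nil]
            push_cast; omega
          · -- nodup
            refine List.Nodup.append hndt (List.nodup_singleton _) ?_
            intro a ha hb
            rw [List.mem_singleton] at hb
            exact hdqt (hb ▸ ha)
          · -- set membership tracks the new window qt ++ [dish]
            intro x
            rw [hrm]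
            simp only [Option.getD_some, PySem.Set.mem_discard, PySem.Set.mem_add, hSQ x,
              List.mem_cons, List.mem_append, List.not_mem_nil, or_false]
            have hx1 : x ∈ qt → x ≠ q0 := fun hm he => hq0 (he ▸ hm)
            have hx2 : x = dish → x ≠ q0 := fun he => ne_of_eq_of_ne he hdq0
            tauto
          · -- recorded positions of the new window
            intro j hj
            simp only [List.length_append, List.length_cons, List.length_nil] at hj ⊢
            by_cases hjlt : j < qt.length
            · have he : (qt ++ [dish])[j]'(by simp; omega) = qt[j] := List.getElem_append_left hjlt
              have hstep := hidx (j + 1) (by simp only [List.length_cons]; omega)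
              rw [List.getElem_cons_succ] at hstep
              rw [he, PySem.Dict.get?_insert,
                if_neg (fun hx : qt[j] = dish => hdqt (hx ▸ List.getElem_mem hjlt)), hstep]
              congr 1
              simp only [List.length_cons]
              push_cast; omega
            · have hje : j = qt.length := by omega
              subst hje
              simp only [List.getElem_concat_length]
              rw [PySem.Dict.get?_insert_self]
              congr 1
              push_cast; omega
          · -- value bounds / membership characterisation
            intro d i hMi
            rw [PySem.Dict.get?_insert] at hMi
            split_ifs at hMi with hdd
            · obtain rfl : i = c + 1 := (Option.some.inj hMi).symm
              refine ⟨by omega, le_refl _, ?_⟩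
              have hmem : d ∈ qt ++ [dish] := by rw [hdd]; simp
              simp only [List.length_append, List.length_cons, List.length_nil]
              push_cast
              exact ⟨fun _ => by omega, fun _ => hmem⟩
            · obtain ⟨h1, h2, h3⟩ := hval d i hMi
              refine ⟨h1, by omega, ?_⟩
              have hmem : d ∈ qt ++ [dish] ↔ d ∈ qt := by
                simp [List.mem_append, hdd]
              rw [hmem]
              simp only [List.length_append, List.length_cons, List.length_nil]
              push_cast
              constructor
              · intro hdt
                -- d sits at position j+1 of the old window: its index is known exactly
                obtain ⟨j, hj, hje⟩ := List.getElem_of_mem hdt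
                have hstep := hidx (j + 1) (by simp only [List.length_cons]; omega)
                rw [List.getElem_cons_succ, hje, hMi] at hstep
                have heq := Option.some.inj hstep
                simp only [List.length_cons] at heq
                push_cast at heq
                omega
              · intro hlt
                have hdQ : d ∈ q0 :: qt := h3.mpr (by
                  simp only [List.length_cons]; push_cast; omega)
                rcases List.mem_cons.mp hdQ with he | he
                · -- d = q0 would have index c - |Q| + 1, too small
                  exfalso
                  have hstep := hidx 0 (by simp)
                  rw [List.getElem_cons_zero] at hstep
                  rw [← he, hMi] at hstep
                  have heq := Option.some.inj hstep
                  simp only [List.length_cons] at heq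
                  push_cast at heq
                  omega
                · exact he
    · -- window not yet full: dish simply joins it
      rw [if_neg hpop]
      simp only [List.length_append, List.length_cons, List.length_nil] at hpop
      push_cast at hpop
      have hLc : (Q.length : Int) = c := by omega
      dsimp only
      refine ⟨by trivial, by omega, ?_, ?_, ?_, ?_, ?_⟩
      · simp only [List.length_append, List.length_cons, List.length_nil]
        push_cast; omega
      · refine List.Nodup.append hnd (List.nodup_singleton _) ?_
        intro a ha hb
        rw [List.mem_singleton] at hb
        exact hd (hb ▸ ha)
      · intro x
        simp only [PySem.Set.mem_add, hSQ x, List.mem_append, List.mem_singleton]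
      · intro j hj
        simp only [List.length_append, List.length_cons, List.length_nil] at hj ⊢
        by_cases hjlt : j < Q.length
        · have he : (Q ++ [dish])[j]'(by simp; omega) = Q[j] := List.getElem_append_left hjlt
          rw [he, PySem.Dict.get?_insert,
            if_neg (fun hx : Q[j] = dish => hd (hx ▸ List.getElem_mem hjlt)), hidx j hjlt]
          congr 1
          push_cast; omega
        · have hje : j = Q.length := by omega
          subst hje
          simp only [List.getElem_concat_length]
          rw [PySem.Dict.get?_insert_self]
          congr 1
          push_cast; omega
      · intro d i hMi
        rw [PySem.Dict.get?_insert] at hMi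
        split_ifs at hMi with hdd
        · obtain rfl : i = c + 1 := (Option.some.inj hMi).symm
          refine ⟨by omega, le_refl _, ?_⟩
          have hmem : d ∈ Q ++ [dish] := by rw [hdd]; simp
          simp only [List.length_append, List.length_cons, List.length_nil]
          push_cast
          exact ⟨fun _ => by omega, fun _ => hmem⟩
        · obtain ⟨h1, h2, h3⟩ := hval d i hMi
          refine ⟨h1, by omega, ?_⟩
          have hdQ : d ∈ Q := h3.mpr (by omega)
          have hmem : d ∈ Q ++ [dish] := List.mem_append_left _ hdQ
          simp only [List.length_append, List.length_cons, List.length_nil]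
          push_cast
          exact ⟨fun _ => by omega, fun _ => hmem⟩

lemma pvFold_inv (K : Int) : ∀ (D : List Int) (S : PySem.Set Int) (Q : List Int) (c : Int)
    (M : PySem.Dict Int Int), pvInv K S Q c M →
    (D.foldl (pvStepA K) (S, Q, c)).2.2 = (D.foldl (pvStepB K) (M, c)).2 := by
  intro D
  induction D with
  | nil => intro S Q c M _; rfl
  | cons dish rest ih =>
      intro S Q c M h
      obtain ⟨heq, hinv⟩ := pvStep_inv K dish S Q c M h
      simp only [List.foldl_cons]
      have ha : ((pvStepA K (S, Q, c) dish).1, (pvStepA K (S, Q, c) dish).2.1,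
          (pvStepA K (S, Q, c) dish).2.2) = pvStepA K (S, Q, c) dish := rfl
      have hb : ((pvStepB K (M, c) dish).1, (pvStepB K (M, c) dish).2)
          = pvStepB K (M, c) dish := rfl
      have hmain := ih (pvStepA K (S, Q, c) dish).1 (pvStepA K (S, Q, c) dish).2.1
        (pvStepA K (S, Q, c) dish).2.2 (pvStepB K (M, c) dish).1 hinv
      rw [ha, ← heq, hb] at hmain
      exact hmain

lemma pvInv_init (K : Int) : pvInv K PySem.Set.empty [] 0 PySem.Dict.empty := by
  refine ⟨le_refl _, by simp, List.nodup_nil, by simp [PySem.Set.empty], by intro j hj; simp at hj, ?_⟩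
  intro d i hMi
  rw [PySem.Dict.get?_empty] at hMi
  exact absurd hMi (Option.some_ne_none i).symm

-- ===== VERDICT (by name: the statement is the Claim_ definition above) =====
theorem getMaximumEatenDishCount_spec : Claim_equal_getMaximumEatenDishCount := by
  intro N D K _
  show getMaximumEatenDishCount N D K = getMaximumEatenDishCount_alt N D K
  exact pvFold_inv K D _ _ _ _ (pvInv_init K)
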